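-- pv_equiv track=rewrite | github.com/pelkazach/une-femme-supply-chain | Projects/Supply_Chain_Platform/src/services/po_processor.py | normalize_sku
-- ===== SOURCE A (Python) =====
-- VALID_SKUS = frozenset({"UFBub250", "UFRos250", "UFRed250", "UFCha250"})
--
-- SKU_ALIASES: dict[str, str] = {
--     # Bubble variants
--     "UF-BUB-250": "UFBub250",
--     "UFBUB250": "UFBub250",
--     "UF BUB 250": "UFBub250",
--     "UF BUBBLES 250": "UFBub250",
--     "BUBBLES 250ML": "UFBub250",
--     "UNE FEMME BUBBLES": "UFBub250",
--     # Rose variants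
--     "UF-ROS-250": "UFRos250",
--     "UFROS250": "UFRos250",
--     "UF ROS 250": "UFRos250",
--     "UF ROSE 250": "UFRos250",
--     "ROSE 250ML": "UFRos250",
--     "UNE FEMME ROSE": "UFRos250",
--     # Red variants
--     "UF-RED-250": "UFRed250",
--     "UFRED250": "UFRed250",
--     "UF RED 250": "UFRed250",
--     "RED 250ML": "UFRed250",
--     "UNE FEMME RED": "UFRed250",
--     # Chardonnay variants
--     "UF-CHA-250": "UFCha250",
--     "UFCHA250": "UFCha250",
--     "UF CHA 250": "UFCha250",
--     "UF CHARDONNAY 250": "UFCha250",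
--     "CHARDONNAY 250ML": "UFCha250",
--     "UNE FEMME CHARDONNAY": "UFCha250",
-- }
--
-- def normalize_sku(sku: str) -> str | None:
--     """Normalize a SKU string to the standard format.
--
--     Args:
--         sku: The SKU string to normalize.
--
--     Returns:
--         The normalized SKU if valid, None otherwise.
--     """
--     if not sku:
--         return None
--
--     # Clean up the SKU
--     clean_sku = sku.strip().upper()
--
--     # Check if it's already a valid SKU
--     if clean_sku in VALID_SKUS or clean_sku in {s.upper() for s in VALID_SKUS}:
--         # Return the properly cased version
--         for valid_sku in VALID_SKUS:
--             if valid_sku.upper() == clean_sku: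
--                 return valid_sku
--         return None
--
--     # Check aliases
--     if clean_sku in SKU_ALIASES:
--         return SKU_ALIASES[clean_sku]
--
--     # Try partial matching for common formats
--     for alias, normalized in SKU_ALIASES.items():
--         if clean_sku.replace("-", "").replace(" ", "") == alias.replace(
--             "-", ""
--         ).replace(" ", ""):
--             return normalized
--
--     return None
-- ===== SOURCE B (Python) =====
-- VALID_SKUS = frozenset({"UFBub250", "UFRos250", "UFRed250", "UFCha250"})
--
-- SKU_ALIASES: dict[str, str] = {
--     "UF-BUB-250": "UFBub250",
--     "UFBUB250": "UFBub250",
--     "UF BUB 250": "UFBub250",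
--     "UF BUBBLES 250": "UFBub250",
--     "BUBBLES 250ML": "UFBub250",
--     "UNE FEMME BUBBLES": "UFBub250",
--     "UF-ROS-250": "UFRos250",
--     "UFROS250": "UFRos250",
--     "UF ROS 250": "UFRos250",
--     "UF ROSE 250": "UFRos250",
--     "ROSE 250ML": "UFRos250",
--     "UNE FEMME ROSE": "UFRos250",
--     "UF-RED-250": "UFRed250",
--     "UFRED250": "UFRed250",
--     "UF RED 250": "UFRed250",
--     "RED 250ML": "UFRed250",
--     "UNE FEMME RED": "UFRed250",
--     "UF-CHA-250": "UFCha250",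
--     "UFCHA250": "UFCha250",
--     "UF CHA 250": "UFCha250",
--     "UF CHARDONNAY 250": "UFCha250",
--     "CHARDONNAY 250ML": "UFCha250",
--     "UNE FEMME CHARDONNAY": "UFCha250",
-- }
--
--
-- def _key(s: str) -> str:
--     return s.upper().replace("-", "").replace(" ", "")
--
--
-- # One fully-normalized lookup table built once at import time: every canonical
-- # SKU and every alias, keyed by its upper-cased form with '-' and ' ' removed.
-- _SKU_INDEX: dict[str, str] = {}
-- for _s in ("UFBub250", "UFRos250", "UFRed250", "UFCha250"):
--     _SKU_INDEX[_key(_s)] = _s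
-- for _a, _v in SKU_ALIASES.items():
--     _SKU_INDEX[_key(_a)] = _v
--
--
-- def normalize_sku(sku: str) -> str | None:
--     """Normalize a SKU string to the standard format."""
--     if not sku:
--         return None
--     return _SKU_INDEX.get(_key(sku.strip()))
-- ===== Notes on version B (the rewrite author's own statement) =====
-- stated objective: simpler
-- what changed: Replaces A's four sequential strategies (valid-set membership plus a casing loop, exact alias lookup, and a per-call scan that re-normalizes every alias) with one module-level index from fully-normalized keys to canonical SKUs and a single dict lookup per call.
import Mathlib
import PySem

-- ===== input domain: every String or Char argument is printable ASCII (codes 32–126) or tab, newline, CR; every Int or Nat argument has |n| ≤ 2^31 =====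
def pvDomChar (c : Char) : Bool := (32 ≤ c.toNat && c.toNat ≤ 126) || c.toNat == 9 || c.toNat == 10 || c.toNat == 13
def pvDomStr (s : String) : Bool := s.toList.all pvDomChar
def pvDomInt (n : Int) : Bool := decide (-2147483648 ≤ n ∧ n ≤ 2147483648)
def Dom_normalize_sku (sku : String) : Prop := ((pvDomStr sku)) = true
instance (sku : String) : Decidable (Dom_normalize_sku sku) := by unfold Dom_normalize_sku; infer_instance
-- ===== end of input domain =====

-- B replaces A's four sequential matching strategies with one precomputed
-- normalized-key index and a single dict lookup (objective: simpler).

-- ===== PORT A =====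
-- VALID_SKUS (frozenset; only membership and a value-determined search are taken from it)
def pvValidSkus : PySem.Set String :=
  PySem.Set.ofList ["UFBub250", "UFRos250", "UFRed250", "UFCha250"]

-- SKU_ALIASES (dict literal, insertion order)
def pvSkuAliases : PySem.Dict String String :=
  PySem.Dict.ofList [("UF-BUB-250", "UFBub250"), ("UFBUB250", "UFBub250"), ("UF BUB 250", "UFBub250"),
    ("UF BUBBLES 250", "UFBub250"), ("BUBBLES 250ML", "UFBub250"), ("UNE FEMME BUBBLES", "UFBub250"),
    ("UF-ROS-250", "UFRos250"), ("UFROS250", "UFRos250"), ("UF ROS 250", "UFRos250"),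
    ("UF ROSE 250", "UFRos250"), ("ROSE 250ML", "UFRos250"), ("UNE FEMME ROSE", "UFRos250"),
    ("UF-RED-250", "UFRed250"), ("UFRED250", "UFRed250"), ("UF RED 250", "UFRed250"),
    ("RED 250ML", "UFRed250"), ("UNE FEMME RED", "UFRed250"),
    ("UF-CHA-250", "UFCha250"), ("UFCHA250", "UFCha250"), ("UF CHA 250", "UFCha250"),
    ("UF CHARDONNAY 250", "UFCha250"), ("CHARDONNAY 250ML", "UFCha250"), ("UNE FEMME CHARDONNAY", "UFCha250")]

-- 'for valid_sku in VALID_SKUS: if valid_sku.upper() == clean_sku: return valid_sku' then 'return None'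
-- (result is order-independent: the uppered valid SKUs are pairwise distinct)
def pvValidLoop (clean : String) : List String → Option String
  | [] => none
  | v :: rest => if PySem.Str.upper v == clean then some v else pvValidLoop clean rest

-- 'for alias, normalized in SKU_ALIASES.items(): if clean.replace(...) == alias.replace(...): return normalized'
def pvAliasLoop (clean : String) : List (String × String) → Option String
  | [] => none
  | (a, v) :: rest =>
    if (PySem.Str.replace (PySem.Str.replace clean "-" "") " " "") ==
       (PySem.Str.replace (PySem.Str.replace a "-" "") " " "") then some v
    else pvAliasLoop clean rest

def normalize_sku (sku : String) : Option String :=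
  if sku == "" then none
  else
    let clean := PySem.Str.upper (PySem.Str.strip sku)
    if PySem.Set.contains pvValidSkus clean
        || PySem.Set.contains (PySem.Set.ofList (List.map PySem.Str.upper pvValidSkus)) clean then
      pvValidLoop clean pvValidSkus
    else
      -- 'if clean in SKU_ALIASES: return SKU_ALIASES[clean]' (lookup = membership + value)
      match pvSkuAliases.get? clean with
      | some v => some v
      | none => pvAliasLoop clean pvSkuAliases.items

-- ===== PORT B =====
-- _key(s) = s.upper().replace("-", "").replace(" ", "")
def pvKey (s : String) : String :=
  PySem.Str.replace (PySem.Str.replace (PySem.Str.upper s) "-" "") " " ""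

-- _SKU_INDEX: the canonical SKUs, then every alias, each keyed by its fully-normalized form
def pvSkuIndex : PySem.Dict String String :=
  (pvSkuAliases.items).foldl (fun d p => d.insert (pvKey p.1) p.2)
    ((["UFBub250", "UFRos250", "UFRed250", "UFCha250"] : List String).foldl
      (fun d s => d.insert (pvKey s) s) PySem.Dict.empty)

def normalize_sku_alt (sku : String) : Option String :=
  if sku == "" then none
  else pvSkuIndex.get? (pvKey (PySem.Str.strip sku))

-- ===== PRECONDITION & SPEC =====
def Spec_normalize_sku (sku : String) (out : Option String) : Prop := out = normalize_sku_alt sku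
instance (sku : String) (out : Option String) : Decidable (Spec_normalize_sku sku out) := by unfold Spec_normalize_sku; infer_instance

-- ===== CLAIM (what is proved, stated in full; the proofs are below) =====
def Claim_equal_normalize_sku : Prop := ∀ (sku : String), Dom_normalize_sku sku → Spec_normalize_sku sku (normalize_sku sku)

-- ===== LEMMAS AND PROOFS =====

-- literal normal forms of the module constants (proved once, used as rewrites)
def pvAliasList : List (String × String) := [("UF-BUB-250", "UFBub250"), ("UFBUB250", "UFBub250"), ("UF BUB 250", "UFBub250"), ("UF BUBBLES 250", "UFBub250"), ("BUBBLES 250ML", "UFBub250"), ("UNE FEMME BUBBLES", "UFBub250"), ("UF-ROS-250", "UFRos250"), ("UFROS250", "UFRos250"), ("UF ROS 250", "UFRos250"), ("UF ROSE 250", "UFRos250"), ("ROSE 250ML", "UFRos250"), ("UNE FEMME ROSE", "UFRos250"), ("UF-RED-250", "UFRed250"), ("UFRED250", "UFRed250"), ("UF RED 250", "UFRed250"), ("RED 250ML", "UFRed250"), ("UNE FEMME RED", "UFRed250"), ("UF-CHA-250", "UFCha250"), ("UFCHA250", "UFCha250"), ("UF CHA 250", "UFCha250"), ("UF CHARDONNAY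 250", "UFCha250"), ("CHARDONNAY 250ML", "UFCha250"), ("UNE FEMME CHARDONNAY", "UFCha250")]
def pvIndexList : List (String × String) := [("UFBUB250", "UFBub250"), ("UFROS250", "UFRos250"), ("UFRED250", "UFRed250"), ("UFCHA250", "UFCha250"), ("UFBUBBLES250", "UFBub250"), ("BUBBLES250ML", "UFBub250"), ("UNEFEMMEBUBBLES", "UFBub250"), ("UFROSE250", "UFRos250"), ("ROSE250ML", "UFRos250"), ("UNEFEMMEROSE", "UFRos250"), ("RED250ML", "UFRed250"), ("UNEFEMMERED", "UFRed250"), ("UFCHARDONNAY250", "UFCha250"), ("CHARDONNAY250ML", "UFCha250"), ("UNEFEMMECHARDONNAY", "UFCha250")]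
def pvNormAliasList : List (String × String) := [("UFBUB250", "UFBub250"), ("UFBUB250", "UFBub250"), ("UFBUB250", "UFBub250"), ("UFBUBBLES250", "UFBub250"), ("BUBBLES250ML", "UFBub250"), ("UNEFEMMEBUBBLES", "UFBub250"), ("UFROS250", "UFRos250"), ("UFROS250", "UFRos250"), ("UFROS250", "UFRos250"), ("UFROSE250", "UFRos250"), ("ROSE250ML", "UFRos250"), ("UNEFEMMEROSE", "UFRos250"), ("UFRED250", "UFRed250"), ("UFRED250", "UFRed250"), ("UFRED250", "UFRed250"), ("RED250ML", "UFRed250"), ("UNEFEMMERED", "UFRed250"), ("UFCHA250", "UFCha250"), ("UFCHA250", "UFCha250"), ("UFCHA250", "UFCha250"), ("UFCHARDONNAY250", "UFCha250"), ("CHARDONNAY250ML", "UFCha250"), ("UNEFEMMECHARDONNAY", "UFCha250")]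

lemma pvVS_nf : pvValidSkus = ["UFBub250", "UFRos250", "UFRed250", "UFCha250"] := by decide
lemma pvVSU_nf : PySem.Set.ofList (List.map PySem.Str.upper (["UFBub250", "UFRos250", "UFRed250", "UFCha250"] : List String)) = ["UFBUB250", "UFROS250", "UFRED250", "UFCHA250"] := by decide
lemma pvA_nf : pvSkuAliases = PySem.Dict.mk pvAliasList := by decide
lemma pvItems_nf : (PySem.Dict.mk pvAliasList).items = pvAliasList := by decide
lemma pvK0 : pvKey "UFBub250" = "UFBUB250" := by decide
lemma pvK1 : pvKey "UFRos250" = "UFROS250" := by decide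
lemma pvK2 : pvKey "UFRed250" = "UFRED250" := by decide
lemma pvK3 : pvKey "UFCha250" = "UFCHA250" := by decide
lemma pvK4 : pvKey "UF-BUB-250" = "UFBUB250" := by decide
lemma pvK5 : pvKey "UFBUB250" = "UFBUB250" := by decide
lemma pvK6 : pvKey "UF BUB 250" = "UFBUB250" := by decide
lemma pvK7 : pvKey "UF BUBBLES 250" = "UFBUBBLES250" := by decide
lemma pvK8 : pvKey "BUBBLES 250ML" = "BUBBLES250ML" := by decide
lemma pvK9 : pvKey "UNE FEMME BUBBLES" = "UNEFEMMEBUBBLES" := by decide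
lemma pvK10 : pvKey "UF-ROS-250" = "UFROS250" := by decide
lemma pvK11 : pvKey "UFROS250" = "UFROS250" := by decide
lemma pvK12 : pvKey "UF ROS 250" = "UFROS250" := by decide
lemma pvK13 : pvKey "UF ROSE 250" = "UFROSE250" := by decide
lemma pvK14 : pvKey "ROSE 250ML" = "ROSE250ML" := by decide
lemma pvK15 : pvKey "UNE FEMME ROSE" = "UNEFEMMEROSE" := by decide
lemma pvK16 : pvKey "UF-RED-250" = "UFRED250" := by decide
lemma pvK17 : pvKey "UFRED250" = "UFRED250" := by decide
lemma pvK18 : pvKey "UF RED 250" = "UFRED250" := by decide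
lemma pvK19 : pvKey "RED 250ML" = "RED250ML" := by decide
lemma pvK20 : pvKey "UNE FEMME RED" = "UNEFEMMERED" := by decide
lemma pvK21 : pvKey "UF-CHA-250" = "UFCHA250" := by decide
lemma pvK22 : pvKey "UFCHA250" = "UFCHA250" := by decide
lemma pvK23 : pvKey "UF CHA 250" = "UFCHA250" := by decide
lemma pvK24 : pvKey "UF CHARDONNAY 250" = "UFCHARDONNAY250" := by decide
lemma pvK25 : pvKey "CHARDONNAY 250ML" = "CHARDONNAY250ML" := by decide
lemma pvK26 : pvKey "UNE FEMME CHARDONNAY" = "UNEFEMMECHARDONNAY" := by decide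

lemma pvIdx_nf : pvSkuIndex = PySem.Dict.mk pvIndexList := by
  simp only [pvSkuIndex, pvA_nf, pvItems_nf, pvAliasList, List.foldl_cons, List.foldl_nil, pvK0, pvK1, pvK2, pvK3, pvK4, pvK5, pvK6, pvK7, pvK8, pvK9, pvK10, pvK11, pvK12, pvK13, pvK14, pvK15, pvK16, pvK17, pvK18, pvK19, pvK20, pvK21, pvK22, pvK23, pvK24, pvK25, pvK26]
  decide

lemma pvN0 : PySem.Str.replace (PySem.Str.replace "UFBub250" "-" "") " " "" = "UFBub250" := by decide
lemma pvN1 : PySem.Str.replace (PySem.Str.replace "UFRos250" "-" "") " " "" = "UFRos250" := by decide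
lemma pvN2 : PySem.Str.replace (PySem.Str.replace "UFRed250" "-" "") " " "" = "UFRed250" := by decide
lemma pvN3 : PySem.Str.replace (PySem.Str.replace "UFCha250" "-" "") " " "" = "UFCha250" := by decide
lemma pvN4 : PySem.Str.replace (PySem.Str.replace "UF-BUB-250" "-" "") " " "" = "UFBUB250" := by decide
lemma pvN5 : PySem.Str.replace (PySem.Str.replace "UFBUB250" "-" "") " " "" = "UFBUB250" := by decide
lemma pvN6 : PySem.Str.replace (PySem.Str.replace "UF BUB 250" "-" "") " " "" = "UFBUB250" := by decide
lemma pvN7 : PySem.Str.replace (PySem.Str.replace "UF BUBBLES 250" "-" "") " " "" = "UFBUBBLES250" := by decide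
lemma pvN8 : PySem.Str.replace (PySem.Str.replace "BUBBLES 250ML" "-" "") " " "" = "BUBBLES250ML" := by decide
lemma pvN9 : PySem.Str.replace (PySem.Str.replace "UNE FEMME BUBBLES" "-" "") " " "" = "UNEFEMMEBUBBLES" := by decide
lemma pvN10 : PySem.Str.replace (PySem.Str.replace "UF-ROS-250" "-" "") " " "" = "UFROS250" := by decide
lemma pvN11 : PySem.Str.replace (PySem.Str.replace "UFROS250" "-" "") " " "" = "UFROS250" := by decide
lemma pvN12 : PySem.Str.replace (PySem.Str.replace "UF ROS 250" "-" "") " " "" = "UFROS250" := by decide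
lemma pvN13 : PySem.Str.replace (PySem.Str.replace "UF ROSE 250" "-" "") " " "" = "UFROSE250" := by decide
lemma pvN14 : PySem.Str.replace (PySem.Str.replace "ROSE 250ML" "-" "") " " "" = "ROSE250ML" := by decide
lemma pvN15 : PySem.Str.replace (PySem.Str.replace "UNE FEMME ROSE" "-" "") " " "" = "UNEFEMMEROSE" := by decide
lemma pvN16 : PySem.Str.replace (PySem.Str.replace "UF-RED-250" "-" "") " " "" = "UFRED250" := by decide
lemma pvN17 : PySem.Str.replace (PySem.Str.replace "UFRED250" "-" "") " " "" = "UFRED250" := by decide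
lemma pvN18 : PySem.Str.replace (PySem.Str.replace "UF RED 250" "-" "") " " "" = "UFRED250" := by decide
lemma pvN19 : PySem.Str.replace (PySem.Str.replace "RED 250ML" "-" "") " " "" = "RED250ML" := by decide
lemma pvN20 : PySem.Str.replace (PySem.Str.replace "UNE FEMME RED" "-" "") " " "" = "UNEFEMMERED" := by decide
lemma pvN21 : PySem.Str.replace (PySem.Str.replace "UF-CHA-250" "-" "") " " "" = "UFCHA250" := by decide
lemma pvN22 : PySem.Str.replace (PySem.Str.replace "UFCHA250" "-" "") " " "" = "UFCHA250" := by decide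
lemma pvN23 : PySem.Str.replace (PySem.Str.replace "UF CHA 250" "-" "") " " "" = "UFCHA250" := by decide
lemma pvN24 : PySem.Str.replace (PySem.Str.replace "UF CHARDONNAY 250" "-" "") " " "" = "UFCHARDONNAY250" := by decide
lemma pvN25 : PySem.Str.replace (PySem.Str.replace "CHARDONNAY 250ML" "-" "") " " "" = "CHARDONNAY250ML" := by decide
lemma pvN26 : PySem.Str.replace (PySem.Str.replace "UNE FEMME CHARDONNAY" "-" "") " " "" = "UNEFEMMECHARDONNAY" := by decide

-- first-match lookup over an already-normalized association list
def pvLook (k : String) : List (String × String) → Option String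
  | [] => none
  | (a, v) :: rest => if k == a then some v else pvLook k rest

lemma pvAliasLoop_eq (c : String) : pvAliasLoop c pvAliasList =
    pvLook (PySem.Str.replace (PySem.Str.replace c "-" "") " " "") pvNormAliasList := by
  simp only [pvAliasList, pvNormAliasList, pvAliasLoop, pvLook, pvN0, pvN1, pvN2, pvN3, pvN4, pvN5, pvN6, pvN7, pvN8, pvN9, pvN10, pvN11, pvN12, pvN13, pvN14, pvN15, pvN16, pvN17, pvN18, pvN19, pvN20, pvN21, pvN22, pvN23, pvN24, pvN25, pvN26]

lemma pvLook_eq_get (k : String) : pvLook k pvNormAliasList = (PySem.Dict.mk pvIndexList).get? k := by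
  by_cases hk0 : k = "UFBUB250"
  · subst hk0; decide
  by_cases hk1 : k = "UFROS250"
  · subst hk1; decide
  by_cases hk2 : k = "UFRED250"
  · subst hk2; decide
  by_cases hk3 : k = "UFCHA250"
  · subst hk3; decide
  by_cases hk4 : k = "UFBUBBLES250"
  · subst hk4; decide
  by_cases hk5 : k = "BUBBLES250ML"
  · subst hk5; decide
  by_cases hk6 : k = "UNEFEMMEBUBBLES"
  · subst hk6; decide
  by_cases hk7 : k = "UFROSE250"
  · subst hk7; decide
  by_cases hk8 : k = "ROSE250ML"
  · subst hk8; decide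
  by_cases hk9 : k = "UNEFEMMEROSE"
  · subst hk9; decide
  by_cases hk10 : k = "RED250ML"
  · subst hk10; decide
  by_cases hk11 : k = "UNEFEMMERED"
  · subst hk11; decide
  by_cases hk12 : k = "UFCHARDONNAY250"
  · subst hk12; decide
  by_cases hk13 : k = "CHARDONNAY250ML"
  · subst hk13; decide
  by_cases hk14 : k = "UNEFEMMECHARDONNAY"
  · subst hk14; decide
  simp [pvLook, pvNormAliasList, pvIndexList, PySem.Dict.get?, hk0, hk1, hk2, hk3, hk4, hk5, hk6, hk7, hk8, hk9, hk10, hk11, hk12, hk13, hk14, Ne.symm hk0, Ne.symm hk1, Ne.symm hk2, Ne.symm hk3, Ne.symm hk4, Ne.symm hk5, Ne.symm hk6, Ne.symm hk7, Ne.symm hk8, Ne.symm hk9, Ne.symm hk10, Ne.symm hk11, Ne.symm hk12, Ne.symm hk13, Ne.symm hk14]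

lemma pvMain (c : String) :
    (if PySem.Set.contains pvValidSkus c
        || PySem.Set.contains (PySem.Set.ofList (List.map PySem.Str.upper pvValidSkus)) c then
      pvValidLoop c pvValidSkus
    else
      match pvSkuAliases.get? c with
      | some v => some v
      | none => pvAliasLoop c pvSkuAliases.items)
    = pvSkuIndex.get? (PySem.Str.replace (PySem.Str.replace c "-" "") " " "") := by
  rw [pvVS_nf, pvVSU_nf, pvA_nf, pvItems_nf, pvIdx_nf, pvAliasLoop_eq, pvLook_eq_get]
  by_cases hc0 : c = "UFBub250"
  · subst hc0; rw [pvN0]; decide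
  by_cases hc1 : c = "UFRos250"
  · subst hc1; rw [pvN1]; decide
  by_cases hc2 : c = "UFRed250"
  · subst hc2; rw [pvN2]; decide
  by_cases hc3 : c = "UFCha250"
  · subst hc3; rw [pvN3]; decide
  by_cases hc4 : c = "UF-BUB-250"
  · subst hc4; rw [pvN4]; decide
  by_cases hc5 : c = "UFBUB250"
  · subst hc5; rw [pvN5]; decide
  by_cases hc6 : c = "UF BUB 250"
  · subst hc6; rw [pvN6]; decide
  by_cases hc7 : c = "UF BUBBLES 250"
  · subst hc7; rw [pvN7]; decide
  by_cases hc8 : c = "BUBBLES 250ML"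
  · subst hc8; rw [pvN8]; decide
  by_cases hc9 : c = "UNE FEMME BUBBLES"
  · subst hc9; rw [pvN9]; decide
  by_cases hc10 : c = "UF-ROS-250"
  · subst hc10; rw [pvN10]; decide
  by_cases hc11 : c = "UFROS250"
  · subst hc11; rw [pvN11]; decide
  by_cases hc12 : c = "UF ROS 250"
  · subst hc12; rw [pvN12]; decide
  by_cases hc13 : c = "UF ROSE 250"
  · subst hc13; rw [pvN13]; decide
  by_cases hc14 : c = "ROSE 250ML"
  · subst hc14; rw [pvN14]; decide
  by_cases hc15 : c = "UNE FEMME ROSE"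
  · subst hc15; rw [pvN15]; decide
  by_cases hc16 : c = "UF-RED-250"
  · subst hc16; rw [pvN16]; decide
  by_cases hc17 : c = "UFRED250"
  · subst hc17; rw [pvN17]; decide
  by_cases hc18 : c = "UF RED 250"
  · subst hc18; rw [pvN18]; decide
  by_cases hc19 : c = "RED 250ML"
  · subst hc19; rw [pvN19]; decide
  by_cases hc20 : c = "UNE FEMME RED"
  · subst hc20; rw [pvN20]; decide
  by_cases hc21 : c = "UF-CHA-250"
  · subst hc21; rw [pvN21]; decide
  by_cases hc22 : c = "UFCHA250"
  · subst hc22; rw [pvN22]; decide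
  by_cases hc23 : c = "UF CHA 250"
  · subst hc23; rw [pvN23]; decide
  by_cases hc24 : c = "UF CHARDONNAY 250"
  · subst hc24; rw [pvN24]; decide
  by_cases hc25 : c = "CHARDONNAY 250ML"
  · subst hc25; rw [pvN25]; decide
  by_cases hc26 : c = "UNE FEMME CHARDONNAY"
  · subst hc26; rw [pvN26]; decide
  simp [PySem.Dict.get?, pvAliasList, pvIndexList, hc0, hc1, hc2, hc3, hc4, hc5, hc6, hc7, hc8, hc9, hc10, hc11, hc12, hc13, hc14, hc15, hc16, hc17, hc18, hc19, hc20, hc21, hc22, hc23, hc24, hc25, hc26, Ne.symm hc0, Ne.symm hc1, Ne.symm hc2, Ne.symm hc3, Ne.symm hc4, Ne.symm hc5, Ne.symm hc6, Ne.symm hc7, Ne.symm hc8, Ne.symm hc9, Ne.symm hc10, Ne.symm hc11, Ne.symm hc12, Ne.symm hc13, Ne.symm hc14, Ne.symm hc15, Ne.symm hc16, Ne.symm hc17, Ne.symm hc18, Ne.symm hc19, Ne.symm hc20, Ne.symm hc21, Ne.symm hc22, Ne.symm hc23, Ne.symm hc24, Ne.symm hc25, Ne.symm hc26]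

-- ===== VERDICT (by name: the statement is the Claim_ definition above) =====
theorem normalize_sku_spec : Claim_equal_normalize_sku := by
  intro sku _
  unfold Spec_normalize_sku normalize_sku normalize_sku_alt
  by_cases hs : sku = ""
  · subst hs; decide
  · simp only [pvKey, beq_iff_eq, if_neg hs]
    exact pvMain (PySem.Str.upper (PySem.Str.strip sku))
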